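-- pv_equiv track=rewrite | github.com/tsinghua-auto4/ct_note | Programmers/2305/30/이경훈_42860_조이스틱.py | solution
-- ===== SOURCE A (Python) =====
-- def solution(name):
--     answer = 0
--     change = [min(ord(n) - ord('A'), 26 - (ord(n) - ord('A'))) for n in name]
--     l = len(name)
--     min_val = l - 1
--
--     for i, c in enumerate(name):
--         next_i = i+1
--         while next_i < l and name[next_i] == 'A':
--             next_i += 1
--         min_val = min(min_val, i*2 + l - next_i, i + 2*(l - next_i))
--     answer = sum(change) + min_val
--
--     return answer
-- ===== SOURCE B (Python) =====
-- def solution(name):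
--     l = len(name)
--     # one backward pass: nxt[i] = first index j > i with name[j] != 'A', or l
--     nxt = [0] * l
--     nn = l
--     for i in range(l - 1, -1, -1):
--         nxt[i] = nn
--         if name[i] != 'A':
--             nn = i
--     total = 0
--     min_val = l - 1
--     # one forward pass: per-char up/down cost plus best movement cost
--     for i, (c, nx) in enumerate(zip(name, nxt)):
--         d = ord(c) - ord('A')
--         total += min(d, 26 - d)
--         min_val = min(min_val, 2 * i + l - nx, i + 2 * (l - nx))
--     return total + min_val
-- ===== Notes on version B (the rewrite author's own statement) =====
-- stated objective: alternative
-- what changed: A rescans forward over consecutive 'A's from every position; B precomputes the next-non-'A' index for every position in one backward pass and then computes the change sum and the minimal movement cost in a single forward pass over the zipped table.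
import Mathlib
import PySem

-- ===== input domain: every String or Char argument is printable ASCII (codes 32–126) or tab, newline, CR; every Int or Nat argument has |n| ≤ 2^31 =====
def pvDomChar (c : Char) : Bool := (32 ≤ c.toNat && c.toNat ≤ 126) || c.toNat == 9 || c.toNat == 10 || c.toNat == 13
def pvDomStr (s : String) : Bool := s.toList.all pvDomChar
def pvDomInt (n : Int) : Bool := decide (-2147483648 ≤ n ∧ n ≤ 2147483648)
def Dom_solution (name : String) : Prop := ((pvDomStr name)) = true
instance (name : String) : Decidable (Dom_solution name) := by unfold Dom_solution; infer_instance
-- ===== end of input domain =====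

-- B replaces A's per-position inner while-scan over runs of 'A' by a
-- precomputed next-non-'A' table (one backward pass) and a single forward
-- pass; objective: alternative (different traversal, same measured cost).

-- ===== PORT A =====
-- the inner "while next_i < l and name[next_i] == 'A': next_i += 1" loop of A
def whileNextA (cs : List Char) (j : Nat) : Nat :=
  if h : j < cs.length then
    if cs[j] = 'A' then whileNextA cs (j+1) else j
  else j
termination_by cs.length - j
decreasing_by omega

def solution (name : String) : Int :=
  let cs := name.toList
  let change := cs.map (fun n => min ((n.toNat : Int) - 65) (26 - ((n.toNat : Int) - 65)))
  let l := cs.length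
  let min_val : Int :=
    (PySem.List.enumerate cs).foldl
      (fun m p =>
        min (min m (p.1 * 2 + (l : Int) - (whileNextA cs (p.1.toNat + 1) : Int)))
          (p.1 + 2 * ((l : Int) - (whileNextA cs (p.1.toNat + 1) : Int))))
      ((l : Int) - 1)
  change.sum + min_val

-- ===== PORT B =====
-- Source B's backward index loop maintaining nn is written as the structural
-- recursion over the same state (entries are produced on the return from the
-- recursion, i.e. right to left, exactly as the Python loop fills nxt):
-- returns (nxt entries for the suffix starting at index i, nn at entry to step i-1).
def nxtAux : List Char → Nat → List Nat × Nat
  | [], i => ([], i)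
  | c :: rest, i =>
    let r := nxtAux rest (i + 1)
    (r.2 :: r.1, if c ≠ 'A' then i else r.2)

def solution_alt (name : String) : Int :=
  let cs := name.toList
  let l := cs.length
  let nxt := (nxtAux cs 0).1
  let res : Int × Int :=
    (PySem.List.enumerate (cs.zip nxt)).foldl
      (fun (acc : Int × Int) p =>
        (acc.1 + min ((p.2.1.toNat : Int) - 65) (26 - ((p.2.1.toNat : Int) - 65)),
         min (min acc.2 (2 * p.1 + (l : Int) - (p.2.2 : Int))) (p.1 + 2 * ((l : Int) - (p.2.2 : Int)))))
      (0, (l : Int) - 1)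
  res.1 + res.2

-- ===== PRECONDITION & SPEC =====
def Spec_solution (name : String) (out : Int) : Prop := out = solution_alt name
instance (name : String) (out : Int) : Decidable (Spec_solution name out) := by unfold Spec_solution; infer_instance

-- ===== CLAIM (what is proved, stated in full; the proofs are below) =====
def Claim_equal_solution : Prop := ∀ (name : String), Dom_solution name → Spec_solution name (solution name)

-- ===== LEMMAS AND PROOFS =====

-- number of leading 'A's
def cntA (ds : List Char) : Nat := (ds.takeWhile (fun c => c == 'A')).length

theorem cntA_nil : cntA [] = 0 := rfl

theorem cntA_cons_A (ds : List Char) : cntA ('A' :: ds) = cntA ds + 1 := by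
  simp [cntA, List.takeWhile]

theorem cntA_cons_ne (c : Char) (ds : List Char) (h : ¬ c = 'A') : cntA (c :: ds) = 0 := by
  have hb : (c == 'A') = false := by simp [h]
  simp [cntA, List.takeWhile, hb]

theorem whileNextA_eq (cs : List Char) (j : Nat) :
    whileNextA cs j = j + cntA (cs.drop j) := by
  induction j using whileNextA.induct cs with
  | case1 j h hA ih =>
    rw [whileNextA]
    simp only [h, dif_pos, hA, if_pos]
    rw [ih, List.drop_eq_getElem_cons h, hA, cntA_cons_A]
    omega
  | case2 j h hA =>
    rw [whileNextA]
    simp only [h, dif_pos]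
    rw [if_neg hA, List.drop_eq_getElem_cons h, cntA_cons_ne _ _ hA]
    omega
  | case3 j h =>
    rw [whileNextA, dif_neg h, List.drop_eq_nil_of_le (by omega), cntA_nil]
    omega

theorem nxtAux_snd (ds : List Char) (i : Nat) : (nxtAux ds i).2 = i + cntA ds := by
  induction ds generalizing i with
  | nil => simp [nxtAux, cntA_nil]
  | cons c rest ih =>
    by_cases hc : c = 'A'
    · subst hc
      simp [nxtAux, ih, cntA_cons_A]
      omega
    · simp [nxtAux, hc, cntA_cons_ne _ _ hc]

theorem nxtAux_fst_length (ds : List Char) (i : Nat) : (nxtAux ds i).1.length = ds.length := by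
  induction ds generalizing i with
  | nil => rfl
  | cons c rest ih => simp [nxtAux, ih]

theorem nxtAux_fst_get (ds : List Char) (i k : Nat) (h : k < ds.length)
    (h2 : k < (nxtAux ds i).1.length) :
    (nxtAux ds i).1[k] = i + k + 1 + cntA (ds.drop (k + 1)) := by
  induction ds generalizing i k with
  | nil => simp at h
  | cons c rest ih =>
    cases k with
    | zero => simp [nxtAux, nxtAux_snd]
    | succ k' =>
      have h' : k' < rest.length := by simpa using h
      have h2' : k' < (nxtAux rest (i + 1)).1.length := by
        rw [nxtAux_fst_length]; exact h'
      simp only [nxtAux, List.getElem_cons_succ]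
      rw [ih (i + 1) k' h' h2']
      simp [List.drop]
      omega

-- generic correspondence: B's single pair-fold over the zipped table equals
-- A's separate change-sum plus A's min-fold, given the table matches w pointwise
theorem fold_pair_eq (L : Int) (w : Int → Nat) :
    ∀ (xs : List Char) (ns : List Nat) (s t m : Int),
    xs.length = ns.length →
    (∀ k (hk : k < ns.length), ns[k] = w (s + k)) →
    (PySem.List.enumerate (xs.zip ns) s).foldl
      (fun (acc : Int × Int) p =>
        (acc.1 + min ((p.2.1.toNat : Int) - 65) (26 - ((p.2.1.toNat : Int) - 65)),
         min (min acc.2 (2 * p.1 + L - (p.2.2 : Int))) (p.1 + 2 * (L - (p.2.2 : Int)))))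
      (t, m)
    = (t + (xs.map (fun n => min ((n.toNat : Int) - 65) (26 - ((n.toNat : Int) - 65)))).sum,
       (PySem.List.enumerate xs s).foldl
         (fun m' p =>
           min (min m' (p.1 * 2 + L - (w p.1 : Int))) (p.1 + 2 * (L - (w p.1 : Int)))) m) := by
  intro xs
  induction xs with
  | nil =>
    intro ns s t m hlen _
    cases ns with
    | nil => simp [PySem.List.enumerate_nil]
    | cons n ns' => simp at hlen
  | cons c xs' ih =>
    intro ns s t m hlen hpt
    cases ns with
    | nil => simp at hlen
    | cons n ns' =>
      have h0 : n = w s := by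
        have := hpt 0 (by simp)
        simpa using this
      have hrec := ih ns' (s + 1) (t + min ((c.toNat : Int) - 65) (26 - ((c.toNat : Int) - 65)))
        (min (min m (2 * s + L - (n : Int))) (s + 2 * (L - (n : Int))))
        (by simpa using hlen)
        (by
          intro k hk
          have h1 := hpt (k + 1) (by simpa using Nat.succ_lt_succ hk)
          simp only [List.getElem_cons_succ] at h1
          rw [h1]; congr 1; push_cast; ring)
      simp only [List.zip_cons_cons, PySem.List.enumerate_cons, List.foldl_cons]
      rw [hrec, h0]
      simp only [Prod.mk.injEq, List.map_cons, List.sum_cons]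
      constructor
      · ring
      · ring_nf

theorem solution_eq (name : String) : solution name = solution_alt name := by
  unfold solution solution_alt
  dsimp only
  have hlen : name.toList.length = (nxtAux name.toList 0).1.length :=
    (nxtAux_fst_length name.toList 0).symm
  have hpt : ∀ k (hk : k < (nxtAux name.toList 0).1.length),
      (nxtAux name.toList 0).1[k]
        = (fun j : Int => whileNextA name.toList (j.toNat + 1)) ((0 : Int) + k) := by
    intro k hk
    have hk' : k < name.toList.length := by rw [hlen]; exact hk
    simp only [zero_add, Int.toNat_natCast]
    rw [nxtAux_fst_get name.toList 0 k hk' hk, whileNextA_eq]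
    omega
  have h := fold_pair_eq (name.toList.length : Int)
    (fun j : Int => whileNextA name.toList (j.toNat + 1))
    name.toList (nxtAux name.toList 0).1 0 0 ((name.toList.length : Int) - 1) hlen hpt
  rw [h]
  dsimp only
  omega

-- ===== VERDICT (by name: the statement is the Claim_ definition above) =====
theorem solution_spec : Claim_equal_solution := by
  intro name _
  unfold Spec_solution
  exact solution_eq name
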